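-- pv_equiv track=rewrite | github.com/mindflowai/mindflow | mindflow/commands/diff.py | batch_git_diffs
-- ===== SOURCE A (Python) =====
-- from typing import List, Tuple
--
-- def batch_git_diffs(file_diffs: List[Tuple[str, str]], token_limit: int) -> List[List[Tuple[str, str]]]:
--     batches = []
--     current_batch = []
--     current_batch_size = 0
--     for (file_name, diff_content) in file_diffs:
--         if len(diff_content) > token_limit:
--             chunks = [diff_content[i:i + token_limit] for i in range(0, len(diff_content), token_limit)]
--             for chunk in chunks:
--                 if current_batch_size + len(chunk) > token_limit * 2:
--                     batches.append(current_batch)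
--                     current_batch = []
--                     current_batch_size = 0
--                 current_batch.append((file_name, chunk))
--                 current_batch_size += len(chunk)
--         elif current_batch_size + len(diff_content) > token_limit * 2:
--             batches.append(current_batch)
--             current_batch = [(file_name, diff_content)]
--             current_batch_size = len(diff_content)
--         else:
--             current_batch.append((file_name, diff_content))
--             current_batch_size += len(diff_content)
--     if current_batch:
--         batches.append(current_batch)
--     return batches
-- ===== SOURCE B (Python) =====
-- def batch_git_diffs(file_diffs, token_limit):
--     # Pass 1: explode every diff into its pieces (oversized diffs are chunked).
--     pieces = []
--     for file_name, diff_content in file_diffs: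
--         if len(diff_content) > token_limit:
--             pieces.extend((file_name, diff_content[i:i + token_limit])
--                           for i in range(0, len(diff_content), token_limit))
--         else:
--             pieces.append((file_name, diff_content))
--     # Pass 2: one uniform greedy packing loop over the flat piece list.
--     batches = []
--     current_batch = []
--     current_batch_size = 0
--     for piece in pieces:
--         size = len(piece[1])
--         if current_batch_size + size > token_limit * 2:
--             batches.append(current_batch)
--             current_batch = []
--             current_batch_size = 0
--         current_batch.append(piece)
--         current_batch_size += size
--     if current_batch:
--         batches.append(current_batch)
--     return batches
-- ===== Notes on version B (the rewrite author's own statement) =====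
-- stated objective: simpler
-- what changed: A's single interleaved pass with three in-loop branches is split into an explode pass that flattens every diff into (name, piece) chunks and one uniform greedy-packing pass over the flat piece list; Pre_ excludes token_limit = 0 with a non-empty diff, where both A and B raise ValueError from range(0, len, 0).
import Mathlib
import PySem

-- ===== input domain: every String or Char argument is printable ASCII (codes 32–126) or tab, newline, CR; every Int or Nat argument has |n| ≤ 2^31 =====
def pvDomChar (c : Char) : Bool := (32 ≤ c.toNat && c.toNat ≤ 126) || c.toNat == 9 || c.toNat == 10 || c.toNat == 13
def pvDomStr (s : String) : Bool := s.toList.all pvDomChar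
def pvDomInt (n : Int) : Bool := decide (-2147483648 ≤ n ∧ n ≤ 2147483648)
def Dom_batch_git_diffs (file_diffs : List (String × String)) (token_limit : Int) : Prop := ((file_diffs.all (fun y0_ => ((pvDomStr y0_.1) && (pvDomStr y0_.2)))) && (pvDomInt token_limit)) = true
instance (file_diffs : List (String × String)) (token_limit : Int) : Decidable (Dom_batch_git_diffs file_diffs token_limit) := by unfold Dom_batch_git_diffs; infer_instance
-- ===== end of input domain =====

-- B splits A's single interleaved loop into an explode pass (flatten diffs into pieces)
-- followed by one uniform greedy-packing pass; return values proved equal wherever A returns.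

-- ===== PORT A =====
def batch_git_diffs (file_diffs : List (String × String)) (token_limit : Int) : List (List (String × String)) :=
  let st := file_diffs.foldl (fun (st : List (List (String × String)) × List (String × String) × Int) fd =>
    let batches := st.1
    let current_batch := st.2.1
    let current_batch_size := st.2.2
    let file_name := fd.1
    let diff_content := fd.2
    if PySem.Str.len diff_content > token_limit then
      let chunks := (PySem.List.pyRange 0 (PySem.Str.len diff_content) token_limit).map
        (fun i => PySem.Str.slice diff_content (some i) (some (i + token_limit)))
      chunks.foldl (fun (st2 : List (List (String × String)) × List (String × String) × Int) chunk =>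
        if st2.2.2 + PySem.Str.len chunk > token_limit * 2 then
          (st2.1 ++ [st2.2.1], [(file_name, chunk)], PySem.Str.len chunk)
        else
          (st2.1, st2.2.1 ++ [(file_name, chunk)], st2.2.2 + PySem.Str.len chunk))
        (batches, current_batch, current_batch_size)
    else if current_batch_size + PySem.Str.len diff_content > token_limit * 2 then
      (batches ++ [current_batch], [(file_name, diff_content)], PySem.Str.len diff_content)
    else
      (batches, current_batch ++ [(file_name, diff_content)], current_batch_size + PySem.Str.len diff_content))
    ([], [], 0)
  if st.2.1 ≠ [] then st.1 ++ [st.2.1] else st.1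

-- ===== PORT B =====
-- pass 1 of Source B: flatten every diff into its pieces
def pvExplode (file_diffs : List (String × String)) (token_limit : Int) : List (String × String) :=
  file_diffs.foldl (fun (pieces : List (String × String)) fd =>
    if PySem.Str.len fd.2 > token_limit then
      pieces ++ (PySem.List.pyRange 0 (PySem.Str.len fd.2) token_limit).map
        (fun i => (fd.1, PySem.Str.slice fd.2 (some i) (some (i + token_limit))))
    else
      pieces ++ [fd]) []

-- pass 2 of Source B: one uniform greedy-packing step
def pvPack (token_limit : Int)
    (st : List (List (String × String)) × List (String × String) × Int)
    (piece : String × String) : List (List (String × String)) × List (String × String) × Int :=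
  let size := PySem.Str.len piece.2
  if st.2.2 + size > token_limit * 2 then
    (st.1 ++ [st.2.1], [] ++ [piece], 0 + size)
  else
    (st.1, st.2.1 ++ [piece], st.2.2 + size)

def batch_git_diffs_alt (file_diffs : List (String × String)) (token_limit : Int) : List (List (String × String)) :=
  let st := (pvExplode file_diffs token_limit).foldl (pvPack token_limit) ([], [], 0)
  if st.2.1 ≠ [] then st.1 ++ [st.2.1] else st.1

-- ===== PRECONDITION & SPEC =====
-- Pre_ excludes exactly token_limit = 0 together with some non-empty diff: there A raises
-- ValueError from range(0, len(diff_content), 0) (and B raises the same way).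
def Pre_batch_git_diffs (file_diffs : List (String × String)) (token_limit : Int) : Prop :=
  token_limit ≠ 0 ∨ ∀ p ∈ file_diffs, p.2 = ""
instance (file_diffs : List (String × String)) (token_limit : Int) : Decidable (Pre_batch_git_diffs file_diffs token_limit) := by unfold Pre_batch_git_diffs; infer_instance

def pvWitness_batch_git_diffs : (List (String × String)) × Int := ([("a", "xyz")], 2)

def Spec_batch_git_diffs (file_diffs : List (String × String)) (token_limit : Int) (out : List (List (String × String))) : Prop := out = batch_git_diffs_alt file_diffs token_limit
instance (file_diffs : List (String × String)) (token_limit : Int) (out : List (List (String × String))) : Decidable (Spec_batch_git_diffs file_diffs token_limit out) := by unfold Spec_batch_git_diffs; infer_instance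

-- ===== CLAIM =====
def Claim_equal_batch_git_diffs : Prop := ∀ (file_diffs : List (String × String)) (token_limit : Int), Dom_batch_git_diffs file_diffs token_limit → Pre_batch_git_diffs file_diffs token_limit → Spec_batch_git_diffs file_diffs token_limit (batch_git_diffs file_diffs token_limit)

-- ===== LEMMAS AND PROOFS =====

-- A's per-file step equals folding the uniform packing step over that file's pieces.
lemma stepA_eq_pack_pieces (token_limit : Int) (fd : String × String)
    (st : List (List (String × String)) × List (String × String) × Int) :
    (if PySem.Str.len fd.2 > token_limit then
      ((PySem.List.pyRange 0 (PySem.Str.len fd.2) token_limit).map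
        (fun i => PySem.Str.slice fd.2 (some i) (some (i + token_limit)))).foldl
        (fun (st2 : List (List (String × String)) × List (String × String) × Int) chunk =>
          if st2.2.2 + PySem.Str.len chunk > token_limit * 2 then
            (st2.1 ++ [st2.2.1], [(fd.1, chunk)], PySem.Str.len chunk)
          else
            (st2.1, st2.2.1 ++ [(fd.1, chunk)], st2.2.2 + PySem.Str.len chunk)) st
    else if st.2.2 + PySem.Str.len fd.2 > token_limit * 2 then
      (st.1 ++ [st.2.1], [fd], PySem.Str.len fd.2)
    else
      (st.1, st.2.1 ++ [fd], st.2.2 + PySem.Str.len fd.2)) =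
    (if PySem.Str.len fd.2 > token_limit then
      (PySem.List.pyRange 0 (PySem.Str.len fd.2) token_limit).map
        (fun i => (fd.1, PySem.Str.slice fd.2 (some i) (some (i + token_limit))))
    else [fd]).foldl (pvPack token_limit) st := by
  split_ifs with h
  · simp only [List.foldl_map]
    apply PySem.List.foldl_congr_mem
    intro st2 c _
    simp only [pvPack]
    split_ifs <;> simp
  · simp only [List.foldl_cons, List.foldl_nil, pvPack]
    split_ifs <;> simp
  · simp only [List.foldl_cons, List.foldl_nil, pvPack]
    split_ifs <;> simp

-- one file's pieces, as Source B's explode pass produces them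
def pvExplodeOne (token_limit : Int) (fd : String × String) : List (String × String) :=
  if PySem.Str.len fd.2 > token_limit then
    (PySem.List.pyRange 0 (PySem.Str.len fd.2) token_limit).map
      (fun i => (fd.1, PySem.Str.slice fd.2 (some i) (some (i + token_limit))))
  else [fd]

lemma pvExplode_eq_flatMap (file_diffs : List (String × String)) (token_limit : Int) :
    pvExplode file_diffs token_limit = file_diffs.flatMap (pvExplodeOne token_limit) := by
  unfold pvExplode
  rw [PySem.List.foldl_congr_mem
    (g := fun (pieces : List (String × String)) fd => pieces ++ pvExplodeOne token_limit fd)]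
  · exact PySem.List.foldl_append_eq_flatMap _ _ _
  · intro acc fd _
    unfold pvExplodeOne
    split_ifs <;> rfl

lemma foldlA_eq_pack_flatMap (token_limit : Int) (file_diffs : List (String × String)) :
    ∀ st : List (List (String × String)) × List (String × String) × Int,
    file_diffs.foldl (fun (st : List (List (String × String)) × List (String × String) × Int) fd =>
      if PySem.Str.len fd.2 > token_limit then
        ((PySem.List.pyRange 0 (PySem.Str.len fd.2) token_limit).map
          (fun i => PySem.Str.slice fd.2 (some i) (some (i + token_limit)))).foldl
          (fun (st2 : List (List (String × String)) × List (String × String) × Int) chunk =>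
            if st2.2.2 + PySem.Str.len chunk > token_limit * 2 then
              (st2.1 ++ [st2.2.1], [(fd.1, chunk)], PySem.Str.len chunk)
            else
              (st2.1, st2.2.1 ++ [(fd.1, chunk)], st2.2.2 + PySem.Str.len chunk)) st
      else if st.2.2 + PySem.Str.len fd.2 > token_limit * 2 then
        (st.1 ++ [st.2.1], [fd], PySem.Str.len fd.2)
      else
        (st.1, st.2.1 ++ [fd], st.2.2 + PySem.Str.len fd.2)) st =
    (file_diffs.flatMap (pvExplodeOne token_limit)).foldl (pvPack token_limit) st := by
  induction file_diffs with
  | nil => intro st; rfl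
  | cons fd fds ih =>
    intro st
    rw [List.foldl_cons, ih, List.flatMap_cons, List.foldl_append]
    congr 1
    exact stepA_eq_pack_pieces token_limit fd st

theorem batch_git_diffs_spec : Claim_equal_batch_git_diffs := by
  intro file_diffs token_limit _ _
  unfold Spec_batch_git_diffs batch_git_diffs batch_git_diffs_alt
  simp only []
  rw [pvExplode_eq_flatMap, foldlA_eq_pack_flatMap]
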